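-- pv_equiv track=rewrite | github.com/nermadie/CodeForces_Solutions | CodeforcesRound964Div4/prob05.py | solve
-- ===== SOURCE A (Python) =====
-- def solve(l, r):
--     cur_left = l
--     first_l = l
--     count = 0
--     while first_l != 0:
--         first_l //= 3
--         count += 1
--     result = count
--     while 3**count <= r:
--         result += (3**count - cur_left) * count
--         cur_left = 3**count
--         count += 1
--     result += (r - cur_left + 1) * count
--     return result
-- ===== SOURCE B (Python) =====
-- def solve(l, r):
--     # Closed form: with c0 = base-3 digit count of l and K = max(c0, digit count of max(r, 0)),
--     # the block sums telescope to c0 + K*(r+1) - c0*l - (3**K - 3**c0)//2.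
--     def d3(n):
--         c, p = 0, 1
--         while p <= n:
--             p *= 3
--             c += 1
--         return c
--
--     c0 = d3(l)
--     K = max(c0, d3(r if r > 0 else 0))
--     return c0 + K * (r + 1) - c0 * l - (3 ** K - 3 ** c0) // 2
-- ===== Notes on version B (the rewrite author's own statement) =====
-- stated objective: alternative
-- what changed: Replaces A's incremental block-walk (two while loops carrying cur_left/count/result) by a closed-form expression: the per-block sums telescope to c0 + K*(r+1) - c0*l - (3**K - 3**c0)//2 where c0, K are base-3 digit counts, so only two digit-count loops remain and no block iteration at all.
import Mathlib
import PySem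

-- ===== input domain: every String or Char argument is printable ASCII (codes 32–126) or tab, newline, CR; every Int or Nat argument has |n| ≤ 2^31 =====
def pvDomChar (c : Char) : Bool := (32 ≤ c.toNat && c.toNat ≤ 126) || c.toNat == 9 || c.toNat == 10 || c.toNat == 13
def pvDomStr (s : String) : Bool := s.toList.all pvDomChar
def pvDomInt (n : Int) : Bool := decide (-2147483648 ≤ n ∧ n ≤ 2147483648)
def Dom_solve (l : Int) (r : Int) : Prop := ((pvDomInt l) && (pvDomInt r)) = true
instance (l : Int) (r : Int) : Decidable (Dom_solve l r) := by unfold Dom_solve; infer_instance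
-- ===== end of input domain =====

-- B replaces A's two-while-loop block-walk by a closed-form expression (telescoped block sums); alternative algorithm, similar cost.

-- ===== PORT A =====
-- A's first while loop (count base-3 digits of n by repeated //3).  The counter is a
-- nonnegative Python int, carried as Nat for termination.  For n < 0 Python's loop never
-- terminates (excluded by Pre_solve); this total port returns the accumulator there.
def firstLoopA (n : Int) (count : Nat) : Nat :=
  if n = 0 then count
  else if h : 0 < n then firstLoopA (PySem.Int.floordiv n 3) (count + 1)
  else count
termination_by n.toNat
decreasing_by
  have h3 : PySem.Int.floordiv n 3 = n / 3 := PySem.Int.floordiv_eq_ediv_of_pos (by norm_num)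
  rw [h3]; omega

-- A's second while loop: state (cur_left, count, result), then the final
-- 'result += (r - cur_left + 1) * count' on exit.
def secondLoopA (r cur_left : Int) (count : Nat) (result : Int) : Int :=
  if (3:Int) ^ count ≤ r then
    secondLoopA r ((3:Int) ^ count) (count + 1) (result + ((3:Int) ^ count - cur_left) * (count : Int))
  else result + (r - cur_left + 1) * (count : Int)
termination_by (r + 1 - (3:Int) ^ count).toNat
decreasing_by
  have h2 : (0:Int) < 3 ^ count := by positivity
  simp only [pow_succ]
  omega

def solve (l : Int) (r : Int) : Int :=
  let count := firstLoopA l 0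
  secondLoopA r l count (count : Int)

-- ===== PORT B =====
-- Source B's helper d3: threshold loop 'while p <= n: p *= 3; c += 1'.  The running value p
-- is always 3**c, so the port carries the exponent c and writes p as 3 ^ c (same value).
def d3T (n : Int) (c : Nat) : Nat :=
  if (3:Int) ^ c ≤ n then d3T n (c + 1) else c
termination_by (n + 1 - (3:Int) ^ c).toNat
decreasing_by
  have h2 : (0:Int) < 3 ^ c := by positivity
  simp only [pow_succ]
  omega

-- '(3**K - 3**c0) // 2' is ported with PySem.Int.floordiv (Python's floor division).
def solve_alt (l : Int) (r : Int) : Int :=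
  let c0 := d3T l 0
  let K := max c0 (d3T (if 0 < r then r else 0) 0)
  (c0 : Int) + (K : Int) * (r + 1) - (c0 : Int) * l
    - PySem.Int.floordiv ((3:Int) ^ K - (3:Int) ^ c0) 2

-- ===== PRECONDITION & SPEC =====
-- Pre_solve excludes l < 0, where A's first while loop never terminates
-- (in Python, n //= 3 keeps n at -1 forever); A returns on every l ≥ 0.
def Pre_solve (l : Int) (r : Int) : Prop := 0 ≤ l
instance (l : Int) (r : Int) : Decidable (Pre_solve l r) := by unfold Pre_solve; infer_instance
def pvWitness_solve : Int × Int := (5, 20)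

def Spec_solve (l : Int) (r : Int) (out : Int) : Prop := out = solve_alt l r
instance (l : Int) (r : Int) (out : Int) : Decidable (Spec_solve l r out) := by unfold Spec_solve; infer_instance

-- ===== CLAIM (what is proved, stated in full; the proofs are below) =====
def Claim_equal_solve : Prop := ∀ (l : Int) (r : Int), Dom_solve l r → Pre_solve l r → Spec_solve l r (solve l r)

-- ===== LEMMAS AND PROOFS =====

-- d3T characterisation: d3T n c is the least k ≥ c with 3^k > n.
lemma d3T_gt (n : Int) (c : Nat) : n < (3:Int) ^ (d3T n c) := by
  fun_induction d3T n c
  next h ih => exact ih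
  next h => omega

lemma d3T_min (n : Int) (c k : Nat) (hck : c ≤ k) (hk : n < (3:Int) ^ k) : d3T n c ≤ k := by
  induction hd : k - c using Nat.strong_induction_on generalizing c with
  | _ t ih =>
    rw [d3T]
    split_ifs with h
    · have hck' : c < k := by
        rcases Nat.lt_or_ge c k with hlt | hge
        · exact hlt
        · exfalso
          have : (3:Int) ^ k ≤ (3:Int) ^ c := pow_le_pow_right₀ (by norm_num) hge
          omega
      exact ih (k - (c + 1)) (by omega) (c + 1) hck' rfl
    · exact hck

lemma d3T_zero : d3T 0 0 = 0 := by rw [d3T]; norm_num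

-- A's digit-count loop: bracketing for positive n.
lemma floorA_bounds (n : Int) (hn : 0 < n) :
    1 ≤ firstLoopA n 0 ∧ (3:Int) ^ (firstLoopA n 0 - 1) ≤ n ∧ n < (3:Int) ^ (firstLoopA n 0) := by
  have hfd : PySem.Int.floordiv n 3 = n / 3 := PySem.Int.floordiv_eq_ediv_of_pos (by norm_num)
  have hacc : ∀ m : Int, ∀ c : Nat, firstLoopA m c = c + firstLoopA m 0 := by
    intro m
    induction hm : m.toNat using Nat.strong_induction_on generalizing m with
    | _ t ih =>
      intro c
      by_cases h0 : m = 0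
      · subst h0
        rw [show firstLoopA (0:Int) c = c from by rw [firstLoopA]; simp,
            show firstLoopA (0:Int) 0 = 0 from by rw [firstLoopA]; simp]
        omega
      · by_cases hp : 0 < m
        · have hd : PySem.Int.floordiv m 3 = m / 3 := PySem.Int.floordiv_eq_ediv_of_pos (by norm_num)
          rw [firstLoopA]
          simp only [if_neg h0, dif_pos hp]
          conv_rhs => rw [firstLoopA]; simp only [if_neg h0, dif_pos hp]
          rw [hd, ih (m / 3).toNat (by omega) (m / 3) rfl (c + 1),
              ih (m / 3).toNat (by omega) (m / 3) rfl 1]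
          omega
        · rw [show firstLoopA m c = c from by rw [firstLoopA]; simp [h0, hp],
              show firstLoopA m 0 = 0 from by rw [firstLoopA]; simp [h0, hp]]
          omega
  have hrec : firstLoopA n 0 = 1 + firstLoopA (n / 3) 0 := by
    conv_lhs => rw [firstLoopA]
    simp only [if_neg (by omega : ¬ n = 0), dif_pos hn, hfd]
    rw [hacc]
  by_cases hm : n / 3 = 0
  · have hn3 : n < 3 := by omega
    have hz : firstLoopA (0:Int) 0 = 0 := by rw [firstLoopA]; simp
    rw [hrec, hm, hz]
    norm_num; omega
  · have hmpos : 0 < n / 3 := by omega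
    obtain ⟨ih1, ih2, ih3⟩ := floorA_bounds (n / 3) hmpos
    rw [hrec]
    refine ⟨by omega, ?_, ?_⟩
    · have he : 1 + firstLoopA (n / 3) 0 - 1 = (firstLoopA (n / 3) 0 - 1) + 1 := by omega
      rw [he, pow_succ]
      have : (3:Int) ^ (firstLoopA (n / 3) 0 - 1) * 3 ≤ (n / 3) * 3 :=
        mul_le_mul_of_nonneg_right ih2 (by norm_num)
      omega
    · have he : 1 + firstLoopA (n / 3) 0 = (firstLoopA (n / 3) 0) + 1 := by omega
      rw [he, pow_succ]
      have : (n / 3) * 3 < (3:Int) ^ (firstLoopA (n / 3) 0) * 3 :=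
        mul_lt_mul_of_pos_right ih3 (by norm_num)
      omega
termination_by n.toNat
decreasing_by omega

-- the two digit counters agree on nonnegative input
lemma firstLoopA_eq_d3T (n : Int) (hn : 0 ≤ n) : firstLoopA n 0 = d3T n 0 := by
  by_cases h0 : n = 0
  · subst h0
    rw [d3T_zero, firstLoopA]; simp
  · obtain ⟨h1, h2, h3⟩ := floorA_bounds n (by omega)
    have hle : d3T n 0 ≤ firstLoopA n 0 := d3T_min n 0 _ (Nat.zero_le _) h3
    have hgt : firstLoopA n 0 - 1 < d3T n 0 := by
      by_contra hc
      have : (3:Int) ^ (d3T n 0) ≤ (3:Int) ^ (firstLoopA n 0 - 1) :=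
        pow_le_pow_right₀ (by norm_num) (by omega)
      have := d3T_gt n 0
      omega
    omega

-- A's second loop in closed form (telescoped block sums).
lemma secondLoopA_closed (r cur_left : Int) (count : Nat) (result : Int) :
    secondLoopA r cur_left count result =
      result + ((max count (d3T (if 0 < r then r else 0) 0) : Nat) : Int) * (r + 1)
        - (count : Int) * cur_left
        - ((3:Int) ^ (max count (d3T (if 0 < r then r else 0) 0)) - (3:Int) ^ count) / 2 := by
  fun_induction secondLoopA r cur_left count result
  next cur_left count result h ih =>
    have hrpos : 0 < r := lt_of_lt_of_le (by positivity) h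
    rw [if_pos hrpos] at *
    have hKgt : count < d3T r 0 := by
      by_contra hc
      have hle : (3:Int) ^ (d3T r 0) ≤ (3:Int) ^ count :=
        pow_le_pow_right₀ (by norm_num) (by omega)
      have := d3T_gt r 0
      omega
    have hmax1 : max (count + 1) (d3T r 0) = d3T r 0 := by omega
    have hmax0 : max count (d3T r 0) = d3T r 0 := by omega
    rw [ih, hmax1, hmax0]
    set D := d3T r 0 with hD
    have hcD : count + 1 ≤ D := hKgt
    have hdvd : ∀ a b : Nat, a ≤ b → ∃ m : Int, (3:Int) ^ b - (3:Int) ^ a = 2 * m := by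
      intro a b hab
      have h2 : (2:Int) ∣ (3:Int) ^ b - (3:Int) ^ a := by
        have hb : Odd ((3:Int) ^ b) := Odd.pow (by decide)
        have ha : Odd ((3:Int) ^ a) := Odd.pow (by decide)
        obtain ⟨x, hx⟩ := hb; obtain ⟨y, hy⟩ := ha
        exact ⟨x - y, by omega⟩
      obtain ⟨m, hm⟩ := h2
      exact ⟨m, hm⟩
    obtain ⟨m, hm⟩ := hdvd (count + 1) D hcD
    obtain ⟨m', hm'⟩ := hdvd count D (by omega)
    have hem : ((3:Int) ^ D - (3:Int) ^ (count + 1)) / 2 = m := by omega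
    have hem' : ((3:Int) ^ D - (3:Int) ^ count) / 2 = m' := by omega
    rw [hem, hem']
    have hps : (3:Int) ^ (count + 1) = 3 ^ count * 3 := pow_succ 3 count
    have hmm : m' = m + 3 ^ count := by omega
    push_cast
    rw [hmm]
    ring
  next cur_left count result h =>
    have hK : d3T (if 0 < r then r else 0) 0 ≤ count := by
      by_cases hrpos : 0 < r
      · rw [if_pos hrpos]
        exact d3T_min r 0 count (Nat.zero_le _) (by omega)
      · rw [if_neg hrpos]
        rw [d3T_zero]; omega
    have hmax : max count (d3T (if 0 < r then r else 0) 0) = count := by omega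
    rw [hmax]
    simp only [sub_self, Int.zero_ediv]
    ring

-- ===== VERDICT (by name: the statement is the Claim_ definition above) =====
theorem solve_spec : Claim_equal_solve := by
  intro l r _hdom hpre
  unfold Spec_solve solve solve_alt
  rw [firstLoopA_eq_d3T l hpre, secondLoopA_closed]
  dsimp only
  have hfd : PySem.Int.floordiv ((3:Int) ^ (max (d3T l 0) (d3T (if 0 < r then r else 0) 0)) - (3:Int) ^ (d3T l 0)) 2
      = ((3:Int) ^ (max (d3T l 0) (d3T (if 0 < r then r else 0) 0)) - (3:Int) ^ (d3T l 0)) / 2 :=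
    PySem.Int.floordiv_eq_ediv_of_pos (by norm_num)
  rw [hfd]
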